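-- pv_equiv track=rewrite | github.com/inukbaik/practice-project | CSE101/Final 연습/f4f9cfae92474d83bb75e712e318b619_quiz4.py | what_order
-- ===== SOURCE A (Python) =====
-- def what_order(lst):
--     i = 1
--     count = 0
--     while i < len(lst):
--         if lst[i - 1] <= lst[i]:
--             count += 1
--         elif lst[i - 1] > lst[i]:
--             count -= 1
--             if i == len(lst) - 2 and count == len(lst) - 1:
--                 return 2
--         i += 1
--     if count == len(lst) - 1:
--         return 0
--     elif count == (len(lst) - 1) * -1:
--         return 1
--     else: return 2
-- ===== SOURCE B (Python) =====
-- def what_order(lst):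
--     if not lst:
--         return 2
--     if all(a <= b for a, b in zip(lst, lst[1:])):
--         return 0
--     if all(a > b for a, b in zip(lst, lst[1:])):
--         return 1
--     return 2
-- ===== Notes on version B (the rewrite author's own statement) =====
-- stated objective: simpler
-- what changed: Replaces A's single counting pass (signed count compared against +/-(n-1) at the end, plus a dead early-return branch) with an empty-list guard and two short-circuiting all() scans over adjacent pairs.
import Mathlib
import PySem

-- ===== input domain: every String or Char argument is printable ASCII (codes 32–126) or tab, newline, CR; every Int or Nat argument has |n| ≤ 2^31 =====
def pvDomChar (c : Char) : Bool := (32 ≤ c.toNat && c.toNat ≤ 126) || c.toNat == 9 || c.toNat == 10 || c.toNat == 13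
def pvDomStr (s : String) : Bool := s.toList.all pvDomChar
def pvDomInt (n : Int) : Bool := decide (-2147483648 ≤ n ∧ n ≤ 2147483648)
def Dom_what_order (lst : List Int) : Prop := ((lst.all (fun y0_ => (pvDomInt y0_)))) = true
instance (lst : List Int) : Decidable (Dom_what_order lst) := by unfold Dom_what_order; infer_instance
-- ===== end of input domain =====

-- B replaces A's single signed-count pass with an empty-list guard and two all() scans over
-- adjacent pairs: simpler, same O(n) cost. Equivalence is exact on all inputs.

-- ===== PORT A =====
-- the while loop of A: i is the index, count the running signed count; indices lst[i-1], lst[i]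
-- are always in range (1 ≤ i < len), so List.getD is exact here
def whatOrderGo (lst : List Int) (i : Nat) (count : Int) : Int :=
  if i < lst.length then
    if lst.getD (i - 1) 0 ≤ lst.getD i 0 then
      whatOrderGo lst (i + 1) (count + 1)
    else if lst.getD (i - 1) 0 > lst.getD i 0 then
      let count' := count - 1
      if (i : Int) = (lst.length : Int) - 2 ∧ count' = (lst.length : Int) - 1 then 2
      else whatOrderGo lst (i + 1) count'
    else whatOrderGo lst (i + 1) count
  else
    if count = (lst.length : Int) - 1 then 0
    else if count = ((lst.length : Int) - 1) * (-1) then 1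
    else 2
termination_by lst.length - i

def what_order (lst : List Int) : Int := whatOrderGo lst 1 0

-- ===== PORT B =====
def what_order_alt (lst : List Int) : Int :=
  if lst = [] then 2
  else if (lst.zip lst.tail).all (fun p => decide (p.1 ≤ p.2)) then 0
  else if (lst.zip lst.tail).all (fun p => decide (p.1 > p.2)) then 1
  else 2

-- ===== PRECONDITION & SPEC =====
def Spec_what_order (lst : List Int) (out : Int) : Prop := out = what_order_alt lst
instance (lst : List Int) (out : Int) : Decidable (Spec_what_order lst out) := by unfold Spec_what_order; infer_instance

-- ===== CLAIM (what is proved, stated in full; the proofs are below) =====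
def Claim_equal_what_order : Prop := ∀ (lst : List Int), Dom_what_order lst → Spec_what_order lst (what_order lst)

-- ===== LEMMAS AND PROOFS =====

-- signed sum over a list of pairs: +1 for a ≤ b, -1 for a > b
def psum : List (Int × Int) → Int
  | [] => 0
  | p :: ps => (if p.1 ≤ p.2 then 1 else -1) + psum ps

theorem psum_le (ps : List (Int × Int)) : psum ps ≤ ps.length ∧ -(ps.length : Int) ≤ psum ps := by
  induction ps with
  | nil => simp [psum]
  | cons p ps ih =>
    simp only [psum, List.length_cons]
    split_ifs <;> push_cast <;> omega

theorem psum_eq_len (ps : List (Int × Int)) :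
    (psum ps = ps.length) ↔ ps.all (fun p => decide (p.1 ≤ p.2)) = true := by
  induction ps with
  | nil => simp [psum]
  | cons p ps ih =>
    have hb := psum_le ps
    simp only [psum, List.all_cons, Bool.and_eq_true, decide_eq_true_eq, List.length_cons, ← ih]
    by_cases h : p.1 ≤ p.2
    · rw [if_pos h]; push_cast
      constructor
      · intro hh; exact ⟨h, by omega⟩
      · rintro ⟨-, hh⟩; omega
    · rw [if_neg h]; push_cast
      constructor
      · intro hh; omega
      · rintro ⟨hle, -⟩; exact absurd hle h

theorem psum_eq_neg_len (ps : List (Int × Int)) :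
    (psum ps = -(ps.length : Int)) ↔ ps.all (fun p => decide (p.1 > p.2)) = true := by
  induction ps with
  | nil => simp [psum]
  | cons p ps ih =>
    have hb := psum_le ps
    simp only [psum, List.all_cons, Bool.and_eq_true, decide_eq_true_eq, List.length_cons, ← ih]
    by_cases h : p.1 ≤ p.2
    · rw [if_pos h]; push_cast
      constructor
      · intro hh; omega
      · rintro ⟨hgt, -⟩; omega
    · rw [if_neg h]; push_cast
      constructor
      · intro hh; exact ⟨by omega, by omega⟩
      · rintro ⟨-, hh⟩; omega

theorem zip_tail_length (lst : List Int) (h : lst ≠ []) :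
    (lst.zip lst.tail).length = lst.length - 1 := by
  cases lst with
  | nil => simp at h
  | cons a t => simp [List.length_zip]

-- the loop computes the final check applied to count + psum of the remaining pairs
theorem go_spec (lst : List Int) (i : Nat) (count : Int)
    (hi : 1 ≤ i) (hc : count ≤ (i : Int) - 1) :
    whatOrderGo lst i count =
      (if count + psum ((lst.zip lst.tail).drop (i - 1)) = (lst.length : Int) - 1 then 0
       else if count + psum ((lst.zip lst.tail).drop (i - 1)) = ((lst.length : Int) - 1) * (-1) then 1
       else 2) := by
  by_cases h : i < lst.length
  · have h1 : i - 1 < (lst.zip lst.tail).length := by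
      have : lst ≠ [] := by intro hnil; simp [hnil] at h
      rw [zip_tail_length lst this]; omega
    have hget : (lst.zip lst.tail)[i - 1] = (lst.getD (i - 1) 0, lst.getD i 0) := by
      have h2 : i - 1 < lst.length := by omega
      have h3 : i - 1 < lst.tail.length := by simp [List.length_tail]; omega
      have := List.getElem_zip (l := lst) (l' := lst.tail) (i := i - 1) (h := h1)
      rw [this]
      have : lst.tail[i-1] = lst[i-1+1]'(by omega) := by
        simp [List.getElem_tail]
      rw [this]
      have hi1 : i - 1 + 1 = i := by omega
      simp [List.getD_eq_getElem?_getD, h2, hi1, h]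
    have hdrop : (lst.zip lst.tail).drop (i - 1) =
        (lst.getD (i - 1) 0, lst.getD i 0) :: (lst.zip lst.tail).drop i := by
      have hi1 : i - 1 + 1 = i := by omega
      rw [List.drop_eq_getElem_cons h1, hget, hi1]
    rw [whatOrderGo]
    simp only [h, if_true]
    have hstep : (i + 1) - 1 = i := by omega
    by_cases hle : lst.getD (i - 1) 0 ≤ lst.getD i 0
    · rw [if_pos hle, go_spec lst (i+1) (count+1) (by omega) (by push_cast; omega)]
      rw [hstep, hdrop]
      simp only [psum, hle, if_pos]
      split_ifs <;> first | rfl | omega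
    · rw [if_neg hle, if_pos (by omega)]
      have hdead : ¬((i : Int) = (lst.length : Int) - 2 ∧ count - 1 = (lst.length : Int) - 1) := by
        rintro ⟨h1', h2'⟩; omega
      rw [if_neg hdead, go_spec lst (i+1) (count-1) (by omega) (by push_cast; omega)]
      rw [hstep, hdrop]
      simp only [psum, hle, if_false]
      split_ifs <;> first | rfl | omega
  · have hdrop : (lst.zip lst.tail).drop (i - 1) = [] := by
      apply List.drop_eq_nil_of_le
      rcases lst with _ | ⟨a, t⟩
      · simp
      · simp only [List.tail_cons, List.length_zip, List.length_cons] at h ⊢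
        omega
    rw [whatOrderGo]
    simp only [h, if_false, hdrop, psum]
    split_ifs <;> first | rfl | omega
termination_by lst.length - i

-- ===== VERDICT (by name: the statement is the Claim_ definition above) =====
theorem what_order_spec : Claim_equal_what_order := by
  intro lst _
  unfold Spec_what_order what_order what_order_alt
  rw [go_spec lst 1 0 (by omega) (by omega)]
  cases hl : lst with
  | nil => simp [psum]
  | cons a t =>
    rw [← hl]
    have hne : lst ≠ [] := by simp [hl]
    have hlen := zip_tail_length lst hne
    have hlen1 : 1 ≤ lst.length := by simp [hl]
    have hcast : ((lst.zip lst.tail).length : Int) = (lst.length : Int) - 1 := by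
      rw [hlen]; omega
    simp only [List.drop_zero, Nat.sub_self, zero_add, if_neg hne]
    have h1 := psum_eq_len (lst.zip lst.tail)
    have h2 := psum_eq_neg_len (lst.zip lst.tail)
    rw [hcast] at h1 h2
    have hb := psum_le (lst.zip lst.tail)
    rw [hcast] at hb
    by_cases ha : ((lst.zip lst.tail).all (fun p => decide (p.1 ≤ p.2))) = true
    · have he := h1.mpr ha
      rw [if_pos (by omega), if_pos ha]
    · have hne1 : ¬(psum (lst.zip lst.tail) = (lst.length : Int) - 1) := fun e => ha (h1.mp e)
      rw [if_neg (by omega), if_neg ha]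
      by_cases hg : ((lst.zip lst.tail).all (fun p => decide (p.1 > p.2))) = true
      · have he := h2.mpr hg
        rw [if_pos (by omega), if_pos hg]
      · have hne2 : ¬(psum (lst.zip lst.tail) = -((lst.length : Int) - 1)) := fun e => hg (h2.mp e)
        rw [if_neg (by omega), if_neg hg]
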